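-- pv_equiv track=rewrite | github.com/cfgbengaluru24/Team-61 | Grade_decline/grade_decline.py | calculate_negative_rating
-- ===== SOURCE A (Python) =====
-- def calculate_negative_rating(row):
--     negative_rating = 0
--     for i in range(1, len(row)):
--         if row[i] < row[i-1]:  # Check if current value is less than the previous value
--             negative_rating += row[i-1] - row[i]  # Add the difference to negative rating
--         else:
--             negative_rating = 0  # Reset the negative rating if no decline
--     return negative_rating
-- ===== SOURCE B (Python) =====
-- def calculate_negative_rating(row):
--     n = len(row)
--     if n <= 1:
--         return 0
--     r = 0  # index of the last non-decline (start of the trailing declining run)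
--     for i in range(1, n):
--         if row[i] >= row[i-1]:
--             r = i
--     # the declining run row[r..] telescopes exactly (integers)
--     return row[r] - row[-1]
-- ===== Notes on version B (the rewrite author's own statement) =====
-- stated objective: alternative
-- what changed: Instead of accumulating per-step differences with a reset, B finds the last non-decline index r and returns the telescoped closed form: the element at r minus the last element.
import Mathlib
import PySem

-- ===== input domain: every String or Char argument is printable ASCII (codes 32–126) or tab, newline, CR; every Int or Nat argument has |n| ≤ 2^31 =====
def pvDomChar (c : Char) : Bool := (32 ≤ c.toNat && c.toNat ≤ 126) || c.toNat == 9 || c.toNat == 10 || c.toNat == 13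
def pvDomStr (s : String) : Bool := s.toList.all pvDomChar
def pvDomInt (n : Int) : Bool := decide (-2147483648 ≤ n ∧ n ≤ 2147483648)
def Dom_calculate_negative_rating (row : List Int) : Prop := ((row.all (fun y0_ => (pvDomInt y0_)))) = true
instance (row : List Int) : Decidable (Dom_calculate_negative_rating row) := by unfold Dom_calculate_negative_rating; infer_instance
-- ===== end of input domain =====

-- B replaces A's running accumulate-and-reset sum by the last non-decline index r and the telescoped closed form row[r] minus the last element (exact on integers).

-- ===== PORT A =====
def calculate_negative_rating (row : List Int) : Int :=
  (PySem.List.pyRange 1 (row.length : Int) 1).foldl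
    (fun nr i =>
      if PySem.List.pyGetD row i 0 < PySem.List.pyGetD row (i-1) 0 then
        nr + (PySem.List.pyGetD row (i-1) 0 - PySem.List.pyGetD row i 0)
      else 0) 0

-- ===== PORT B =====
def calculate_negative_rating_alt (row : List Int) : Int :=
  if (row.length : Int) ≤ 1 then 0
  else
    let r := (PySem.List.pyRange 1 (row.length : Int) 1).foldl
      (fun r i =>
        if PySem.List.pyGetD row i 0 ≥ PySem.List.pyGetD row (i-1) 0 then i else r) 0
    PySem.List.pyGetD row r 0 - PySem.List.pyGetD row (-1) 0

-- ===== PRECONDITION & SPEC =====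
def Spec_calculate_negative_rating (row : List Int) (out : Int) : Prop := out = calculate_negative_rating_alt row
instance (row : List Int) (out : Int) : Decidable (Spec_calculate_negative_rating row out) := by unfold Spec_calculate_negative_rating; infer_instance

-- ===== CLAIM (what is proved, stated in full; the proofs are below) =====
def Claim_equal_calculate_negative_rating : Prop := ∀ (row : List Int), Dom_calculate_negative_rating row → Spec_calculate_negative_rating row (calculate_negative_rating row)

-- ===== LEMMAS AND PROOFS =====

-- Invariant: after processing range(1, m), A's accumulator equals row[r] - row[m-1]
-- where r is B's current reset index, and 0 ≤ r < m.
theorem pv_invariant (row : List Int) (m : Int) (h1 : 1 ≤ m) :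
    0 ≤ ((PySem.List.pyRange 1 m 1).foldl
      (fun r i =>
        if PySem.List.pyGetD row i 0 ≥ PySem.List.pyGetD row (i-1) 0 then i else r) 0) ∧
    ((PySem.List.pyRange 1 m 1).foldl
      (fun r i =>
        if PySem.List.pyGetD row i 0 ≥ PySem.List.pyGetD row (i-1) 0 then i else r) 0) < m ∧
    ((PySem.List.pyRange 1 m 1).foldl
      (fun nr i =>
        if PySem.List.pyGetD row i 0 < PySem.List.pyGetD row (i-1) 0 then
          nr + (PySem.List.pyGetD row (i-1) 0 - PySem.List.pyGetD row i 0)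
        else 0) 0) =
      PySem.List.pyGetD row ((PySem.List.pyRange 1 m 1).foldl
        (fun r i =>
          if PySem.List.pyGetD row i 0 ≥ PySem.List.pyGetD row (i-1) 0 then i else r) 0) 0
        - PySem.List.pyGetD row (m-1) 0 := by
  induction m, h1 using Int.le_induction with
  | base =>
      simp [PySem.List.pyRange_one_eq_nil (by omega : (1:Int) ≤ 1)]
  | succ n hn ih =>
      obtain ⟨ih0, ih1, ih2⟩ := ih
      rw [PySem.List.pyRange_one_succ_right (by omega : (1:Int) ≤ n)]
      simp only [List.foldl_append, List.foldl_cons, List.foldl_nil]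
      by_cases hlt : PySem.List.pyGetD row n 0 < PySem.List.pyGetD row (n-1) 0
      · have hge : ¬ (PySem.List.pyGetD row n 0 ≥ PySem.List.pyGetD row (n-1) 0) := by omega
        rw [if_pos hlt, if_neg hge]
        refine ⟨ih0, by omega, ?_⟩
        have : n + 1 - 1 = n := by ring
        rw [this, ih2]; ring
      · have hge : PySem.List.pyGetD row n 0 ≥ PySem.List.pyGetD row (n-1) 0 := by omega
        rw [if_neg hlt, if_pos hge]
        refine ⟨by omega, by omega, ?_⟩
        have : n + 1 - 1 = n := by ring
        rw [this]; ring

theorem pv_neg_one (row : List Int) (h : row ≠ []) :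
    PySem.List.pyGetD row (-1) 0 = PySem.List.pyGetD row ((row.length : Int) - 1) 0 := by
  have hlen : 0 < row.length := List.length_pos_iff.mpr h
  have h1 : 1 ≤ row.length := hlen
  simp [PySem.List.pyGetD, PySem.List.pyGet?, PySem.List.pyIdx?, h1]

-- ===== VERDICT (by name: the statement is the Claim_ definition above) =====
theorem calculate_negative_rating_spec : Claim_equal_calculate_negative_rating := by
  intro row _
  unfold Spec_calculate_negative_rating calculate_negative_rating calculate_negative_rating_alt
  by_cases h : (row.length : Int) ≤ 1
  · rw [if_pos h, PySem.List.pyRange_one_eq_nil h]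
    simp
  · rw [if_neg h]
    have hne : row ≠ [] := by
      intro heq; subst heq; simp at h
    obtain ⟨_, _, h2⟩ := pv_invariant row (row.length : Int) (by omega)
    rw [h2, pv_neg_one row hne]
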